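-- pv_equiv track=rewrite | github.com/Panic-Point/AOC2020 | Day05/BinaryBoarding.py | compute_col
-- ===== SOURCE A (Python) =====
-- import math
--
-- NUM_COLS = 8
--
-- def compute_col(s: str) -> int:
--     cols = list(range(NUM_COLS))
--     for c in s[-3:]:
--         try:
--             if c == 'L':
--                 cols = cols[:math.floor((len(cols))/2)]
--             elif c == 'R':
--                 cols = cols[math.ceil(len(cols)/2):]
--         except ValueError:
--             raise ValueError
--
--     if len(cols) != 1:
--         raise ValueError
--     else:
--         return cols[0]
-- ===== SOURCE B (Python) =====
-- def compute_col(s: str) -> int: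
--     t = s[-3:]
--     if len(t) != 3 or any(c not in ('L', 'R') for c in t):
--         raise ValueError
--     val = 0
--     for c in t:
--         val = val * 2 + (1 if c == 'R' else 0)
--     return val
-- ===== Notes on version B (the rewrite author's own statement) =====
-- stated objective: simpler
-- what changed: B validates the last-3 slice once and folds it into a 3-bit integer (val = val*2 + bit) instead of repeatedly halving a shrinking candidate list of columns.
import Mathlib
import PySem

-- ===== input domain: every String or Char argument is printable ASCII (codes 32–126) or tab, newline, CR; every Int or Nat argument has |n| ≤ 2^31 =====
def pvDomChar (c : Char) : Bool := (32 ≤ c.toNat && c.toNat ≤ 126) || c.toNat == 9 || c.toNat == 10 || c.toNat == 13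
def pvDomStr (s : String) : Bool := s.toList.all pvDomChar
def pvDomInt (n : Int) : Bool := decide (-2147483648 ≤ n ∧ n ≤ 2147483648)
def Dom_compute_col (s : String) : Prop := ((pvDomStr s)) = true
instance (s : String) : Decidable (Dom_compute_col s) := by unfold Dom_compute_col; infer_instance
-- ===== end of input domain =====

-- B replaces A's shrinking candidate-list of columns by a direct 3-bit integer fold over the last-3 slice (objective: simpler).

-- ===== PORT A =====
-- one halving step of A's loop body; math.floor(n/2) = n // 2 and math.ceil(n/2) = (n+1) // 2 exactly, for the nonnegative list lengths that occur
def computeColStep (cols : List Int) (c : Char) : List Int :=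
  if c = 'L' then PySem.List.slice cols none (some (PySem.Int.floordiv (cols.length : Int) 2))
  else if c = 'R' then PySem.List.slice cols (some (PySem.Int.floordiv ((cols.length : Int) + 1) 2)) none
  else cols

def compute_col (s : String) : Int :=
  let cols := (PySem.List.slice s.toList (some (-3)) none).foldl computeColStep (PySem.List.pyRange 0 8 1)
  -- under Pre_ the final list has length 1, so cols[0] is total; the default is never used
  PySem.List.pyGetD cols 0 0

-- ===== PORT B =====
def compute_col_alt (s : String) : Int :=
  let t := PySem.List.slice s.toList (some (-3)) none
  if t.length = 3 ∧ ∀ c ∈ t, c = 'L' ∨ c = 'R' then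
    t.foldl (fun v c => v * 2 + if c = 'R' then 1 else 0) 0
  else 0  -- Python B raises ValueError here; excluded by Pre_

-- ===== PRECONDITION & SPEC =====
-- Pre_ excludes exactly the inputs on which A raises ValueError: the last-3 slice must have
-- length 3 (i.e. len(s) ≥ 3) and consist only of 'L'/'R', otherwise fewer than 3 halvings
-- happen and the final candidate list does not have length 1.
def Pre_compute_col (s : String) : Prop :=
  (PySem.List.slice s.toList (some (-3)) none).length = 3 ∧
  ((PySem.List.slice s.toList (some (-3)) none).all fun c => c == 'L' || c == 'R') = true
instance (s : String) : Decidable (Pre_compute_col s) := by unfold Pre_compute_col; infer_instance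

def pvWitness_compute_col : String := "LRL"

def Spec_compute_col (s : String) (out : Int) : Prop := out = compute_col_alt s
instance (s : String) (out : Int) : Decidable (Spec_compute_col s out) := by unfold Spec_compute_col; infer_instance

-- ===== CLAIM (what is proved, stated in full; the proofs are below) =====
def Claim_equal_compute_col : Prop := ∀ (s : String), Dom_compute_col s → Pre_compute_col s → Spec_compute_col s (compute_col s)

-- ===== LEMMAS AND PROOFS =====
theorem compute_col_core (t : List Char) (h3 : t.length = 3)
    (hLR : ∀ c ∈ t, c = 'L' ∨ c = 'R') :
    PySem.List.pyGetD (t.foldl computeColStep (PySem.List.pyRange 0 8 1)) 0 0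
      = t.foldl (fun v c => v * 2 + if c = 'R' then 1 else 0) 0 := by
  obtain ⟨a, b, c, rfl⟩ := List.length_eq_three.mp h3
  have ha := hLR a (by simp)
  have hb := hLR b (by simp)
  have hc := hLR c (by simp)
  rcases ha with rfl | rfl <;> rcases hb with rfl | rfl <;> rcases hc with rfl | rfl <;> decide

-- ===== VERDICT (by name: the statement is the Claim_ definition above) =====
theorem compute_col_spec : Claim_equal_compute_col := by
  intro s _ hpre
  obtain ⟨h3, hall⟩ := hpre
  have hLR : ∀ c ∈ PySem.List.slice s.toList (some (-3)) none, c = 'L' ∨ c = 'R' := by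
    intro c hc
    have := List.all_eq_true.mp hall c hc
    simpa using this
  unfold Spec_compute_col compute_col compute_col_alt
  simp only [if_pos (And.intro h3 hLR)]
  exact compute_col_core _ h3 hLR
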